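-- pv_equiv track=rewrite | github.com/pherdinauer/ANACD3 | anacsync/downloader/strategies.py | _get_segment_order
-- ===== SOURCE A (Python) =====
-- from typing import Any, Dict, List, Optional, Tuple
--
-- def _get_segment_order(num_segments: int) -> List[int]:
--     """Get non-linear segment download order."""
--     if num_segments <= 1:
--         return [0]
--
--     # Start with beginning, end, then middle, then fill gaps
--     order = []
--     order.append(0)  # Start
--     if num_segments > 1:
--         order.append(num_segments - 1)  # End
--
--     # Add middle segments
--     if num_segments > 2:
--         middle = num_segments // 2
--         order.append(middle)
--
--     # Fill remaining segments
--     for i in range(1, num_segments - 1):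
--         if i not in order:
--             order.append(i)
--
--     return order
-- ===== SOURCE B (Python) =====
-- def _get_segment_order(num_segments: int) -> list:
--     """Get non-linear segment download order (closed-form: prefix + two leftover ranges)."""
--     if num_segments <= 1:
--         return [0]
--     if num_segments == 2:
--         return [0, 1]
--     middle = num_segments // 2
--     return [0, num_segments - 1, middle] + list(range(1, middle)) + list(range(middle + 1, num_segments - 1))
-- ===== Notes on version B (the rewrite author's own statement) =====
-- stated objective: faster
-- what changed: Replaces the fill loop with its quadratic list-membership test by directly concatenating the two closed-form leftover index ranges on either side of the middle segment, which are exactly the indices the loop appends.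
import Mathlib
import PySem

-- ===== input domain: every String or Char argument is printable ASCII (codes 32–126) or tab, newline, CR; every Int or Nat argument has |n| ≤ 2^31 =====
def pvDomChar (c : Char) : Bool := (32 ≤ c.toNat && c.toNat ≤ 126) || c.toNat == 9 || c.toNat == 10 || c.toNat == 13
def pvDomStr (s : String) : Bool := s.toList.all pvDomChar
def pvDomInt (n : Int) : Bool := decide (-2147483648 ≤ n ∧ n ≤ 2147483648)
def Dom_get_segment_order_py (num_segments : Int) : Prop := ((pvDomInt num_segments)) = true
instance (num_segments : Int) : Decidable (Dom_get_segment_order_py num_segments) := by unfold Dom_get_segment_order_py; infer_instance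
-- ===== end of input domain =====

-- B replaces A's quadratic fill loop (membership scan over the growing list) by
-- concatenating the two closed-form leftover ranges; same return value everywhere.

-- ===== PORT A =====
def get_segment_order_py (num_segments : Int) : List Int :=
  if num_segments ≤ 1 then [0]
  else
    let order : List Int := []
    let order := order ++ [0]
    let order := if num_segments > 1 then order ++ [num_segments - 1] else order
    let order := if num_segments > 2 then order ++ [PySem.Int.floordiv num_segments 2] else order
    (PySem.List.pyRange 1 (num_segments - 1) 1).foldl
      (fun order i => if i ∈ order then order else order ++ [i]) order

-- ===== PORT B =====
def get_segment_order_py_alt (num_segments : Int) : List Int :=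
  if num_segments ≤ 1 then [0]
  else if num_segments = 2 then [0, 1]
  else
    let middle := PySem.Int.floordiv num_segments 2
    [0, num_segments - 1, middle]
      ++ PySem.List.pyRange 1 middle 1
      ++ PySem.List.pyRange (middle + 1) (num_segments - 1) 1

-- ===== PRECONDITION & SPEC =====
def Spec_get_segment_order_py (num_segments : Int) (out : List Int) : Prop := out = get_segment_order_py_alt num_segments
instance (num_segments : Int) (out : List Int) : Decidable (Spec_get_segment_order_py num_segments out) := by unfold Spec_get_segment_order_py; infer_instance

-- ===== CLAIM (what is proved, stated in full; the proofs are below) =====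
def Claim_equal_get_segment_order_py : Prop := ∀ (num_segments : Int), Dom_get_segment_order_py num_segments → Spec_get_segment_order_py num_segments (get_segment_order_py num_segments)

-- ===== LEMMAS AND PROOFS =====

-- A's fill loop appends every element of l (in order) when l has no duplicates and
-- no element of l is already in the accumulator.
theorem pv_fold_fresh (l : List Int) (acc : List Int) (hn : l.Nodup)
    (h : ∀ i ∈ l, i ∉ acc) :
    l.foldl (fun order i => if i ∈ order then order else order ++ [i]) acc = acc ++ l := by
  induction l generalizing acc with
  | nil => simp
  | cons a t ih =>
    have ha : a ∉ acc := h a (List.mem_cons_self)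
    simp only [List.foldl_cons, if_neg ha]
    rw [ih (acc ++ [a]) hn.of_cons]
    · simp
    · intro i hi
      simp only [List.mem_append, List.mem_singleton]
      rintro (hc | rfl)
      · exact h i (List.mem_cons_of_mem _ hi) hc
      · exact (List.nodup_cons.mp hn).1 hi

-- ===== VERDICT (by name: the statement is the Claim_ definition above) =====
theorem get_segment_order_py_spec : Claim_equal_get_segment_order_py := by
  intro n _
  unfold Spec_get_segment_order_py get_segment_order_py get_segment_order_py_alt
  by_cases h1 : n ≤ 1
  · simp [h1]
  · by_cases h2 : n = 2
    · subst h2; decide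
    · have hn3 : 3 ≤ n := by omega
      have hfd : PySem.Int.floordiv n 2 = n / 2 :=
        PySem.Int.floordiv_eq_ediv_of_pos (by omega)
      set m := n / 2 with hm
      have hm1 : 1 ≤ m := by omega
      have hm2 : m ≤ n - 2 := by omega
      simp only [if_neg h1, if_neg h2, hfd]
      rw [if_pos (by omega : n > 1), if_pos (by omega : n > 2)]
      -- split the loop's range at m
      rw [PySem.List.pyRange_one_append 1 m (n - 1) (by omega) (by omega),
          PySem.List.pyRange_one_cons (by omega : m < n - 1)]
      rw [List.foldl_append]
      rw [pv_fold_fresh _ _ (PySem.List.nodup_pyRange_one _ _) (by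
        intro i hi
        rw [PySem.List.mem_pyRange_one] at hi
        simp only [List.nil_append, List.mem_append,
          List.mem_cons, List.not_mem_nil, or_false]
        omega)]
      simp only [List.foldl_cons]
      rw [if_pos (by
        simp only [List.mem_append, List.mem_cons, List.not_mem_nil, or_false]
        tauto)]
      rw [pv_fold_fresh _ _ (PySem.List.nodup_pyRange_one _ _) (by
        intro i hi
        rw [PySem.List.mem_pyRange_one] at hi
        simp only [List.mem_append, List.mem_cons, List.not_mem_nil, or_false,
          false_or, PySem.List.mem_pyRange_one]
        omega)]
      simp
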